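-- pv_equiv track=rewrite | github.com/GaryNapier/comp_mut | python_scripts/tbprofiler_compare_to_global.py | resolve_lineages
-- ===== SOURCE A (Python) =====
-- def resolve_lineages(data):
--     data = dict(data)
--     while True:
--         improved = False
--         for child in sorted(data,reverse= True,key=lambda x : len(x)):
--             parent = ".".join(child.split(".")[:-1])
--             if any([parent == x for x in data]):
--                 data[parent] = data[parent] + data[child]
--                 del data[child]
--                 improved = True
--                 break
--         if not improved:
--             break
--     return data
-- ===== SOURCE B (Python) =====
-- def resolve_lineages(data):
--     data = dict(data)
--     for child in sorted(data, reverse=True, key=lambda x: len(x)):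
--         parent = ".".join(child.split(".")[:-1])
--         if parent in data:
--             data[parent] = data[parent] + data[child]
--             del data[child]
--     return data
-- ===== Notes on version B (the rewrite author's own statement) =====
-- stated objective: faster
-- what changed: A repeatedly re-sorts all keys and restarts the scan after every single merge (a fixpoint loop); B sorts the keys once by length descending and merges every child into its parent in one pass over that list.
import Mathlib
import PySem

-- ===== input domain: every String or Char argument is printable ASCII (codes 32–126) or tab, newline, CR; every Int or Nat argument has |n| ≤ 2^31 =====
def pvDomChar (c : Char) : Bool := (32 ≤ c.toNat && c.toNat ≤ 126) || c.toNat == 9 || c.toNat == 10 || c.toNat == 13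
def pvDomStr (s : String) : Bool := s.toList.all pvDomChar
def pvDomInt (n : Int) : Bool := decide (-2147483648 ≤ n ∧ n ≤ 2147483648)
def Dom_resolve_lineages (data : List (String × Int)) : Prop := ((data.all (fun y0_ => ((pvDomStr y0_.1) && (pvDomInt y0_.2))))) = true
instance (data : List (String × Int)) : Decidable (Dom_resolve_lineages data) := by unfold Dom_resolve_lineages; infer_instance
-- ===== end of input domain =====

-- B replaces A's restart-after-every-merge fixpoint loop (re-sorting the keys each iteration) by a single
-- pass over the keys sorted once by length descending; measurably faster, same return value.

-- ===== PORT A =====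
-- parent = ".".join(child.split(".")[:-1])   (shared line of both sources)
def pvParent (child : String) : String :=
  PySem.Str.join "." (PySem.List.slice ((PySem.Str.split? child ".").getD []) none (some (-1)))

-- the 'for child in sorted(...): ... break' scan: first child whose parent is present; returns the merged dict
def pvScanA : List String → PySem.Dict String Int → Option (PySem.Dict String Int)
  | [], _ => none
  | child :: rest, d =>
      let parent := pvParent child
      if d.keys.any (fun x => parent == x) then
        some ((d.insert parent (d.getD parent 0 + d.getD child 0)).erase child)
      else pvScanA rest d

-- 'while True: ... if not improved: break'; each pass removes a key, so data.length + 1 rounds always suffice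
def pvLoopA : Nat → PySem.Dict String Int → PySem.Dict String Int
  | 0, d => d
  | f + 1, d =>
      match pvScanA (PySem.List.sorted d.keys (fun x => PySem.Str.len x) true) d with
      | none => d
      | some d' => pvLoopA f d'

def resolve_lineages (data : List (String × Int)) : List (String × Int) :=
  (pvLoopA (data.length + 1) (PySem.Dict.ofList data)).items

-- ===== PORT B =====
-- body of B's single for-loop
def pvStep (d : PySem.Dict String Int) (child : String) : PySem.Dict String Int :=
  let parent := pvParent child
  if d.contains parent then (d.insert parent (d.getD parent 0 + d.getD child 0)).erase child
  else d

def resolve_lineages_alt (data : List (String × Int)) : List (String × Int) :=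
  let d := PySem.Dict.ofList data
  ((PySem.List.sorted d.keys (fun x => PySem.Str.len x) true).foldl pvStep d).items

-- ===== PRECONDITION & SPEC =====
def Spec_resolve_lineages (data : List (String × Int)) (out : List (String × Int)) : Prop := out = resolve_lineages_alt data
instance (data : List (String × Int)) (out : List (String × Int)) : Decidable (Spec_resolve_lineages data out) := by unfold Spec_resolve_lineages; infer_instance

-- ===== CLAIM (what is proved, stated in full; the proofs are below) =====
def Claim_equal_resolve_lineages : Prop := ∀ (data : List (String × Int)), Dom_resolve_lineages data → Spec_resolve_lineages data (resolve_lineages data)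

-- ===== LEMMAS AND PROOFS =====

-- the comparator insertion sort with key=len, reverse=True actually uses
def pvBf : String → String → Bool := fun a b => decide (PySem.Str.len b < PySem.Str.len a)

lemma pvSortedEq (l : List String) :
    PySem.List.sorted l (fun x => PySem.Str.len x) true =
      l.foldl (fun acc x => PySem.List.insertBy pvBf x acc) [] := by
  exact PySem.List.sorted_rev_eq_foldl_insertBy l _

lemma pvInsertBy_all_before (x : String) (zs : List String)
    (h : ∀ z ∈ zs, pvBf x z = true) : PySem.List.insertBy pvBf x zs = x :: zs := by
  cases zs with
  | nil => rfl
  | cons z t => simp [PySem.List.insertBy, h z (by simp)]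

-- filtering out c commutes with inserting x ≠ c into a length-sorted list
lemma pvFilterInsertBy (c x : String) (hxc : x ≠ c) :
    ∀ ys : List String, ys.Pairwise (fun a b => PySem.Str.len b ≤ PySem.Str.len a) →
      (PySem.List.insertBy pvBf x ys).filter (fun y => !(y == c)) =
        PySem.List.insertBy pvBf x (ys.filter (fun y => !(y == c))) := by
  intro ys
  induction ys with
  | nil => intro _; simp [PySem.List.insertBy, hxc]
  | cons y t ih =>
    intro hp
    rw [List.pairwise_cons] at hp
    obtain ⟨hhead, hpt⟩ := hp
    by_cases hb : pvBf x y = true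
    · by_cases hyc : y = c
      · subst hyc
        have hx : PySem.List.insertBy pvBf x (t.filter (fun z => !(z == y))) =
            x :: t.filter (fun z => !(z == y)) := by
          apply pvInsertBy_all_before
          intro z hz
          have hzt : z ∈ t := List.mem_of_mem_filter hz
          have h1 : PySem.Str.len z ≤ PySem.Str.len y := hhead z hzt
          have h2 : PySem.Str.len y < PySem.Str.len x := of_decide_eq_true hb
          exact decide_eq_true (lt_of_le_of_lt h1 h2)
        simp [PySem.List.insertBy, hb, hxc, hx]
      · simp [PySem.List.insertBy, hb, hxc, hyc]
    · by_cases hyc : y = c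
      · subst hyc
        simp [PySem.List.insertBy, hb, ih hpt]
      · simp [PySem.List.insertBy, hb, hyc, ih hpt]

-- filtering out c kills an insert of c itself
lemma pvFilterInsertBySelf (c : String) :
    ∀ zs : List String, (PySem.List.insertBy pvBf c zs).filter (fun y => !(y == c)) =
      zs.filter (fun y => !(y == c)) := by
  intro zs
  induction zs with
  | nil => simp [PySem.List.insertBy]
  | cons z t ih =>
    by_cases hb : pvBf c z = true
    · simp [PySem.List.insertBy, hb]
    · by_cases hzc : z = c
      · subst hzc; simp [PySem.List.insertBy, hb, ih]
      · simp [PySem.List.insertBy, hb, hzc, ih]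

-- filtering out c commutes with continuing the insertion sort over a list avoiding c
lemma pvFoldFilter (c : String) :
    ∀ (l m : List String), c ∉ l →
      (l.foldl (fun acc x => PySem.List.insertBy pvBf x acc)
          (PySem.List.sorted m (fun x => PySem.Str.len x) true)).filter (fun y => !(y == c)) =
        l.foldl (fun acc x => PySem.List.insertBy pvBf x acc)
          ((PySem.List.sorted m (fun x => PySem.Str.len x) true).filter (fun y => !(y == c))) := by
  intro l
  induction l with
  | nil => intro m _; rfl
  | cons x t ih =>
    intro m hc
    have hxc : x ≠ c := fun h => hc (by simp [h])
    have hct : c ∉ t := fun h => hc (by simp [h])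
    have hstep : PySem.List.insertBy pvBf x (PySem.List.sorted m (fun x => PySem.Str.len x) true) =
        PySem.List.sorted (m ++ [x]) (fun x => PySem.Str.len x) true := by
      rw [pvSortedEq, pvSortedEq, List.foldl_append]; rfl
    calc (List.foldl (fun acc x => PySem.List.insertBy pvBf x acc)
            (PySem.List.insertBy pvBf x (PySem.List.sorted m (fun x => PySem.Str.len x) true)) t).filter
              (fun y => !(y == c))
        = (List.foldl (fun acc x => PySem.List.insertBy pvBf x acc)
            (PySem.List.sorted (m ++ [x]) (fun x => PySem.Str.len x) true) t).filter
              (fun y => !(y == c)) := by rw [hstep]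
      _ = List.foldl (fun acc x => PySem.List.insertBy pvBf x acc)
            ((PySem.List.sorted (m ++ [x]) (fun x => PySem.Str.len x) true).filter (fun y => !(y == c))) t := ih _ hct
      _ = List.foldl (fun acc x => PySem.List.insertBy pvBf x acc)
            ((PySem.List.insertBy pvBf x (PySem.List.sorted m (fun x => PySem.Str.len x) true)).filter
              (fun y => !(y == c))) t := by rw [hstep]
      _ = _ := by
            rw [pvFilterInsertBy c x hxc _ (PySem.List.sorted_pairwise_rev m _)]
            rfl

-- main sorting fact: removing an element (occurring once) commutes with the sort
lemma pvSortedFilter (l : List String) (c : String) (hnd : l.Nodup) (hc : c ∈ l) :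
    (PySem.List.sorted l (fun x => PySem.Str.len x) true).filter (fun y => !(y == c)) =
      PySem.List.sorted (l.filter (fun y => !(y == c))) (fun x => PySem.Str.len x) true := by
  obtain ⟨l1, l2, rfl⟩ := List.append_of_mem hc
  have hnd' := hnd
  rw [List.nodup_append] at hnd'
  have hc1 : c ∉ l1 := fun h => hnd'.2.2 c h c (by simp) rfl
  have hc2 : c ∉ l2 := by
    have := hnd'.2.1
    simp at this
    exact this.1
  have hfilt1 : l1.filter (fun y => !(y == c)) = l1 :=
    List.filter_eq_self.2 (fun a ha => by simp; exact fun h => hc1 (h ▸ ha))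
  have hfilt2 : l2.filter (fun y => !(y == c)) = l2 :=
    List.filter_eq_self.2 (fun a ha => by simp; exact fun h => hc2 (h ▸ ha))
  have hins : PySem.List.sorted (l1 ++ [c]) (fun x => PySem.Str.len x) true =
      PySem.List.insertBy pvBf c (PySem.List.sorted l1 (fun x => PySem.Str.len x) true) := by
    rw [pvSortedEq, pvSortedEq, List.foldl_append]; rfl
  have hsfilt : (PySem.List.sorted l1 (fun x => PySem.Str.len x) true).filter (fun y => !(y == c)) =
      PySem.List.sorted l1 (fun x => PySem.Str.len x) true := by
    apply List.filter_eq_self.2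
    intro a ha
    have : a ∈ l1 := (PySem.List.mem_sorted l1 _ true a).1 ha
    simp; exact fun h => hc1 (h ▸ this)
  calc (PySem.List.sorted (l1 ++ c :: l2) (fun x => PySem.Str.len x) true).filter (fun y => !(y == c))
      = (l2.foldl (fun acc x => PySem.List.insertBy pvBf x acc)
          (PySem.List.sorted (l1 ++ [c]) (fun x => PySem.Str.len x) true)).filter (fun y => !(y == c)) := by
        rw [pvSortedEq, pvSortedEq]
        have : l1 ++ c :: l2 = (l1 ++ [c]) ++ l2 := by simp
        rw [this, List.foldl_append]
    _ = l2.foldl (fun acc x => PySem.List.insertBy pvBf x acc)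
          ((PySem.List.sorted (l1 ++ [c]) (fun x => PySem.Str.len x) true).filter (fun y => !(y == c))) :=
        pvFoldFilter c l2 (l1 ++ [c]) hc2
    _ = l2.foldl (fun acc x => PySem.List.insertBy pvBf x acc)
          (PySem.List.sorted l1 (fun x => PySem.Str.len x) true) := by
        rw [hins, pvFilterInsertBySelf, hsfilt]
    _ = PySem.List.sorted ((l1 ++ c :: l2).filter (fun y => !(y == c))) (fun x => PySem.Str.len x) true := by
        have hfl : (l1 ++ c :: l2).filter (fun y => !(y == c)) = l1 ++ l2 := by
          rw [List.filter_append, hfilt1]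
          simp [hfilt2]
        rw [hfl, pvSortedEq l1, pvSortedEq (l1 ++ l2), List.foldl_append]

-- keys of erase = filtered keys
lemma pvMapFilter (c : String) : ∀ (l : List (String × Int)),
    (l.filter (fun p => !(p.1 == c))).map (fun p => p.1) =
      (l.map (fun p => p.1)).filter (fun x => !(x == c)) := by
  intro l
  induction l with
  | nil => rfl
  | cons p t ih =>
    by_cases hp : p.1 = c
    · simp [hp, ih]
    · simp [hp, ih]

lemma pvKeysErase (d : PySem.Dict String Int) (c : String) :
    (d.erase c).keys = d.keys.filter (fun x => !(x == c)) := by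
  show ((d.items.filter (fun p => !(p.1 == c))).map (fun p => p.1)) = _
  exact pvMapFilter c d.items

lemma pvKeysMerge (d : PySem.Dict String Int) (p c : String) (v : Int)
    (hp : d.contains p = true) :
    ((d.insert p v).erase c).keys = d.keys.filter (fun x => !(x == c)) := by
  rw [pvKeysErase, PySem.Dict.keys_insert_of_contains d v hp]

-- 'any([parent == x for x in data])' is the membership test
lemma pvAnyContains (d : PySem.Dict String Int) (p : String) :
    d.keys.any (fun x => p == x) = d.contains p := by
  rw [Bool.eq_iff_iff, List.any_eq_true]
  rw [PySem.Dict.contains_iff_mem_keys]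
  constructor
  · rintro ⟨x, hx, he⟩
    have : p = x := by simpa using he
    exact this ▸ hx
  · intro h; exact ⟨p, h, by simp⟩

-- a scan returning none means every listed child misses
lemma pvScanA_none : ∀ (l : List String) (d : PySem.Dict String Int),
    pvScanA l d = none → ∀ e ∈ l, d.contains (pvParent e) = false := by
  intro l
  induction l with
  | nil => intro d _ e he; cases he
  | cons child rest ih =>
    intro d h e he
    by_cases hb : d.keys.any (fun x => pvParent child == x) = true
    · simp [pvScanA, hb] at h
    · have h' : pvScanA rest d = none := by
        simpa [pvScanA, hb] using h
      rcases List.mem_cons.1 he with he | he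
      · subst he
        rw [← pvAnyContains]
        exact Bool.eq_false_iff.2 hb
      · exact ih d h' e he

-- a scan returning some d' decomposes the list at the first hit
lemma pvScanA_some : ∀ (l : List String) (d d' : PySem.Dict String Int),
    pvScanA l d = some d' → ∃ l1 c l2, l = l1 ++ c :: l2 ∧
      (∀ e ∈ l1, d.contains (pvParent e) = false) ∧
      d.contains (pvParent c) = true ∧
      d' = (d.insert (pvParent c) (d.getD (pvParent c) 0 + d.getD c 0)).erase c := by
  intro l
  induction l with
  | nil => intro d d' h; simp [pvScanA] at h
  | cons child rest ih =>
    intro d d' h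
    by_cases hb : d.keys.any (fun x => pvParent child == x) = true
    · refine ⟨[], child, rest, by simp, by simp, by rw [← pvAnyContains]; exact hb, ?_⟩
      simpa [pvScanA, hb] using h.symm
    · have h' : pvScanA rest d = some d' := by simpa [pvScanA, hb] using h
      obtain ⟨l1, c, l2, heq, hmiss, hhit, hd'⟩ := ih d d' h'
      refine ⟨child :: l1, c, l2, by simp [heq], ?_, hhit, hd'⟩
      intro e he
      rcases List.mem_cons.1 he with he | he
      · subst he; rw [← pvAnyContains]; exact Bool.eq_false_iff.2 hb
      · exact hmiss e he

-- a fold over misses is the identity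
lemma pvFoldSkip : ∀ (l : List String) (d : PySem.Dict String Int),
    (∀ e ∈ l, d.contains (pvParent e) = false) → l.foldl pvStep d = d := by
  intro l
  induction l with
  | nil => intro d _; rfl
  | cons e t ih =>
    intro d h
    have he : d.contains (pvParent e) = false := h e (by simp)
    have : pvStep d e = d := by simp [pvStep, he]
    rw [List.foldl_cons, this]
    exact ih d (fun x hx => h x (by simp [hx]))

-- merging never resurrects an absent key
lemma pvContainsMono (d : PySem.Dict String Int) (p c q : String) (v : Int)
    (hp : d.contains p = true) (hq : d.contains q = false) :
    ((d.insert p v).erase c).contains q = false := by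
  apply Bool.eq_false_iff.2
  intro hcon
  have hmem : q ∈ ((d.insert p v).erase c).keys :=
    (PySem.Dict.contains_iff_mem_keys _ q).1 hcon
  rw [pvKeysMerge d p c v hp] at hmem
  have : q ∈ d.keys := List.mem_of_mem_filter hmem
  exact (Bool.eq_false_iff.1 hq) ((PySem.Dict.contains_iff_mem_keys d q).2 this)

-- size bound for the fuel
lemma pvUpdateSize : ∀ (l : List (String × Int)) (d : PySem.Dict String Int),
    (d.update l).keys.length ≤ d.keys.length + l.length := by
  intro l
  induction l with
  | nil => intro d; simp [PySem.Dict.update]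
  | cons p t ih =>
    intro d
    have h1 : (d.update (p :: t)) = (d.insert p.1 p.2).update t := rfl
    have h2 : (d.insert p.1 p.2).keys.length ≤ d.keys.length + 1 := by
      show ((d.insert p.1 p.2).items.map (fun x => x.1)).length ≤ (d.items.map (fun x => x.1)).length + 1
      simp only [List.length_map]
      have := PySem.Dict.size_insert d p.1 p.2
      simp only [PySem.Dict.size] at this
      split at this <;> omega
    calc (d.update (p :: t)).keys.length = ((d.insert p.1 p.2).update t).keys.length := by rw [h1]
      _ ≤ (d.insert p.1 p.2).keys.length + t.length := ih _
      _ ≤ d.keys.length + 1 + t.length := by omega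
      _ = d.keys.length + (p :: t).length := by simp; omega

-- MAIN: the restart loop equals the single sorted pass
lemma pvMain : ∀ (f : Nat) (d : PySem.Dict String Int), d.keys.Nodup → d.keys.length < f →
    pvLoopA f d = (PySem.List.sorted d.keys (fun x => PySem.Str.len x) true).foldl pvStep d := by
  intro f
  induction f with
  | zero => intro d _ h; omega
  | succ f ih =>
    intro d hnd hlen
    cases hscan : pvScanA (PySem.List.sorted d.keys (fun x => PySem.Str.len x) true) d with
    | none =>
      rw [pvFoldSkip _ d (pvScanA_none _ d hscan)]
      show (match pvScanA (PySem.List.sorted d.keys (fun x => PySem.Str.len x) true) d with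
            | none => d
            | some d' => pvLoopA f d') = d
      rw [hscan]
    | some d' =>
      obtain ⟨l1, c, l2, heq, hmiss, hhit, hd'⟩ := pvScanA_some _ d d' hscan
      have hlnd : (PySem.List.sorted d.keys (fun x => PySem.Str.len x) true).Nodup :=
        ((PySem.List.sorted_perm d.keys (fun x => PySem.Str.len x) true).symm).nodup hnd
      have hcl : c ∈ PySem.List.sorted d.keys (fun x => PySem.Str.len x) true := by rw [heq]; simp
      have hck : c ∈ d.keys := (PySem.List.mem_sorted d.keys _ true c).1 hcl
      have hndsplit := heq ▸ hlnd
      rw [List.nodup_append] at hndsplit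
      have hc1 : c ∉ l1 := fun h => hndsplit.2.2 c h c (by simp) rfl
      have hc2 : c ∉ l2 := by
        have := hndsplit.2.1; simp at this; exact this.1
      -- keys of the merged dict
      have hkeys : d'.keys = d.keys.filter (fun x => !(x == c)) := by
        rw [hd']; exact pvKeysMerge d _ c _ hhit
      have hnd' : d'.keys.Nodup := by rw [hkeys]; exact hnd.filter _
      have hlen' : d'.keys.length < f := by
        rw [hkeys]
        have : (d.keys.filter (fun x => !(x == c))).length < d.keys.length := by
          rw [List.length_filter_lt_length_iff_exists]
          exact ⟨c, hck, by simp⟩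
        omega
      -- sorted keys of d' = l1 ++ l2
      have hsorted' : PySem.List.sorted d'.keys (fun x => PySem.Str.len x) true = l1 ++ l2 := by
        rw [hkeys, ← pvSortedFilter d.keys c hnd hck, heq]
        rw [List.filter_append]
        have hfilt1 : l1.filter (fun y => !(y == c)) = l1 :=
          List.filter_eq_self.2 (fun a ha => by simp; exact fun h => hc1 (h ▸ ha))
        have hfilt2 : l2.filter (fun y => !(y == c)) = l2 :=
          List.filter_eq_self.2 (fun a ha => by simp; exact fun h => hc2 (h ▸ ha))
        rw [hfilt1]
        simp only [List.filter_cons]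
        rw [if_neg (by simp : ¬((!(c == c)) = true)), hfilt2]
      -- l1 misses in d'
      have hmiss' : ∀ e ∈ l1, d'.contains (pvParent e) = false := by
        intro e he
        rw [hd']
        exact pvContainsMono d _ c _ _ hhit (hmiss e he)
      -- step at c
      have hstepc : pvStep d c = d' := by
        rw [hd']; simp [pvStep, hhit]
      have ihd' := ih d' hnd' hlen'
      calc pvLoopA (f + 1) d = pvLoopA f d' := by
              show (match pvScanA (PySem.List.sorted d.keys (fun x => PySem.Str.len x) true) d with
                    | none => d
                    | some d'' => pvLoopA f d'') = pvLoopA f d'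
              rw [hscan]
        _ = (PySem.List.sorted d'.keys (fun x => PySem.Str.len x) true).foldl pvStep d' := ihd'
        _ = (l1 ++ l2).foldl pvStep d' := by rw [hsorted']
        _ = l2.foldl pvStep d' := by rw [List.foldl_append, pvFoldSkip l1 d' hmiss']
        _ = l2.foldl pvStep (pvStep (l1.foldl pvStep d) c) := by
              rw [pvFoldSkip l1 d hmiss, hstepc]
        _ = (PySem.List.sorted d.keys (fun x => PySem.Str.len x) true).foldl pvStep d := by
              rw [heq, List.foldl_append, List.foldl_cons]

-- ===== VERDICT (by name: the statement is the Claim_ definition above) =====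
theorem resolve_lineages_spec : Claim_equal_resolve_lineages := by
  intro data _
  unfold Spec_resolve_lineages resolve_lineages resolve_lineages_alt
  have hnd : (PySem.Dict.ofList data).keys.Nodup := PySem.Dict.nodup_keys_ofList data
  have hlen : (PySem.Dict.ofList data).keys.length < data.length + 1 := by
    show (PySem.Dict.empty.update data).keys.length < data.length + 1
    have h := pvUpdateSize data PySem.Dict.empty
    have he : (PySem.Dict.empty : PySem.Dict String Int).keys.length = 0 := rfl
    omega
  rw [pvMain (data.length + 1) (PySem.Dict.ofList data) hnd hlen]
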